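-- pv_equiv track=rewrite | github.com/fufylev/leet_code_problems_solved | lib/yandex_code_run/hardest_letter.py | get_hardest_letter
-- ===== SOURCE A (Python) =====
-- def get_hardest_letter(n: int, string: str, timeline: list[int]) -> str:
--     if n == 0 or not timeline:
--         return ''
--
--     hardest_letter = string[0]
--     hardest_time = timeline[0]
--     prev_time = timeline[0]
--
--     for i in range(1, n):
--         next_time = timeline[i] - prev_time
--         if next_time >= hardest_time:
--             hardest_time = next_time
--             hardest_letter = string[i]
--         prev_time = timeline[i]
--
--     return hardest_letter
-- ===== SOURCE B (Python) =====
-- def get_hardest_letter(n: int, string: str, timeline: list[int]) -> str: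
--     if n == 0 or not timeline:
--         return ''
--     gaps = [timeline[0]] + [b - a for a, b in zip(timeline, timeline[1:n])]
--     order = sorted(range(n), key=lambda i: (gaps[i], i), reverse=True)
--     return string[order[0]]
-- ===== Notes on version B (the rewrite author's own statement) =====
-- stated objective: alternative
-- what changed: Replaces A's single streaming scan with running hardest-letter/time/prev state by a sort-based selection: build the gaps via pairwise zip differences, sort the indices by the (gap, index) key in reverse, and take the first index; Pre_ excludes negative n (outside the natural domain: A ignores n and returns string[0], B indexes an empty sorted list and raises IndexError) and the inputs where A raises IndexError.
-- outside the precondition, e.g. on get_hardest_letter(-1, 'a', [5]): A returns 'a', B raises IndexError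
import Mathlib
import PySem

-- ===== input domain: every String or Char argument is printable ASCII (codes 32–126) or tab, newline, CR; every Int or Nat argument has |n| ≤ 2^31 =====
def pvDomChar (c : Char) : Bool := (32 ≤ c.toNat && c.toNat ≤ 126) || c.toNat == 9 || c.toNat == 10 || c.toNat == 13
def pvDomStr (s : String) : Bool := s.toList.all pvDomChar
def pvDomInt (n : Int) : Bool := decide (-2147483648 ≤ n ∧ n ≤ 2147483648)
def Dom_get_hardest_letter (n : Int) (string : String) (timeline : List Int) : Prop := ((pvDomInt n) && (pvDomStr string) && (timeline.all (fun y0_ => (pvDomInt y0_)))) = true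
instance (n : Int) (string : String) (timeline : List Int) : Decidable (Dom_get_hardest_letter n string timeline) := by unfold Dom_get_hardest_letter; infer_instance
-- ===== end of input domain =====

-- B replaces A's streaming scan (running hardest letter/time/prev state) by a sort-based selection:
-- gaps built by pairwise zip differences, indices sorted by the (gap, index) key in reverse, first one taken
-- (an alternative, genuinely different decomposition); equivalence is proved on Pre_, exactly where A returns and n ≥ 0.

-- ===== PORT A =====
def pvStepA (string : String) (timeline : List Int) (st : Option (Char × Int × Int)) (i : Int) : Option (Char × Int × Int) :=
  st.bind fun s =>
    match s with
    | (hl, ht, pt) =>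
      (PySem.List.pyGet? timeline i).bind fun ti =>
        let nt := ti - pt
        if ht ≤ nt then (PySem.Str.pyGet? string i).map fun c => (c, nt, ti)
        else some (hl, ht, ti)

def get_hardest_letter (n : Int) (string : String) (timeline : List Int) : String :=
  if n = 0 ∨ timeline = [] then "" else
    match (PySem.List.pyRange 1 n 1).foldl (pvStepA string timeline)
        ((PySem.Str.pyGet? string 0).bind fun c =>
          (PySem.List.pyGet? timeline 0).map fun t0 => (c, t0, t0)) with
    | some (hl, _, _) => String.ofList [hl]
    | none => ""

-- ===== PORT B =====
-- gaps = [timeline[0]] + [b - a for a, b in zip(timeline, timeline[1:n])]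
-- (timeline[0] ported by pyGetD: the guard guarantees timeline ≠ [], so it is exact there)
def pvGapsB (n : Int) (timeline : List Int) : List Int :=
  PySem.List.pyGetD timeline 0 0 ::
    ((timeline.zip (PySem.List.slice timeline (some 1) (some n))).map (fun p => p.2 - p.1))

-- order = sorted(range(n), key=lambda i: (gaps[i], i), reverse=True); return string[order[0]]
-- (gaps[i] ported by pyGetD: under Pre_ every sorted index satisfies i < len(gaps), so it is exact there)
def get_hardest_letter_alt (n : Int) (string : String) (timeline : List Int) : String :=
  if n = 0 ∨ timeline = [] then "" else
    let gaps := pvGapsB n timeline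
    let order := PySem.List.sorted2 (PySem.List.pyRange 0 n 1)
      (fun i => PySem.List.pyGetD gaps i 0) (fun i => i) true
    match PySem.List.pyGet? order 0 with
    | some b =>
      match PySem.Str.pyGet? string b with
      | some c => String.ofList [c]
      | none => ""
    | none => ""

-- ===== PRECONDITION & SPEC =====
-- pvGap timeline i = the "typing gap" of position i (gap 0 is timeline[0] itself, as in A's initialisation).
def pvGap (timeline : List Int) (i : Nat) : Int :=
  if i = 0 then timeline.getD 0 0 else timeline.getD i 0 - timeline.getD (i - 1) 0

-- Pre_ excludes negative n (outside the natural domain: A ignores n there while B indexes an empty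
-- sorted list and raises IndexError) and exactly the inputs where A raises IndexError: a timeline
-- shorter than n, or a string not covering the winning index (the last position with a maximal gap).
def Pre_get_hardest_letter (n : Int) (string : String) (timeline : List Int) : Prop :=
  0 ≤ n ∧ (n = 0 ∨ timeline = [] ∨
    ((n ≤ timeline.length) ∧ ∃ j, j < n.toNat ∧
      (∀ k, k < n.toNat → pvGap timeline k ≤ pvGap timeline j) ∧
      (∀ k, k < n.toNat → j < k → pvGap timeline k < pvGap timeline j) ∧
      j < string.toList.length))
instance (n : Int) (string : String) (timeline : List Int) : Decidable (Pre_get_hardest_letter n string timeline) := by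
  unfold Pre_get_hardest_letter; infer_instance

def pvWitness_get_hardest_letter : Int × String × List Int := (2, "ab", [3, 5])

def Spec_get_hardest_letter (n : Int) (string : String) (timeline : List Int) (out : String) : Prop := out = get_hardest_letter_alt n string timeline
instance (n : Int) (string : String) (timeline : List Int) (out : String) : Decidable (Spec_get_hardest_letter n string timeline out) := by unfold Spec_get_hardest_letter; infer_instance

-- ===== CLAIM (what is proved, stated in full; the proofs are below) =====
def Claim_equal_get_hardest_letter : Prop := ∀ (n : Int) (string : String) (timeline : List Int), Dom_get_hardest_letter n string timeline → Pre_get_hardest_letter n string timeline → Spec_get_hardest_letter n string timeline (get_hardest_letter n string timeline)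

-- ===== LEMMAS AND PROOFS =====

-- the "last argmax" recursion A's loop implements
def lastArg (g : Nat → Int) : Nat → Nat
  | 0 => 0
  | i + 1 => if g (lastArg g i) ≤ g (i + 1) then i + 1 else lastArg g i

theorem lastArg_succ (g : Nat → Int) (i : Nat) (h : 1 ≤ i) :
    lastArg g i = if g (lastArg g (i - 1)) ≤ g i then i else lastArg g (i - 1) := by
  cases i with
  | zero => omega
  | succ k => simp [lastArg]

theorem lastArg_le (g : Nat → Int) (i : Nat) : lastArg g i ≤ i := by
  induction i with
  | zero => simp [lastArg]
  | succ i ih => simp only [lastArg]; split <;> omega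

theorem lastArg_max (g : Nat → Int) (i : Nat) : ∀ k, k ≤ i → g k ≤ g (lastArg g i) := by
  induction i with
  | zero => intro k hk; interval_cases k; simp [lastArg]
  | succ i ih =>
    intro k hk
    simp only [lastArg]; split
    · rename_i h
      rcases Nat.lt_or_ge k (i + 1) with h' | h'
      · exact le_trans (ih k (by omega)) h
      · have : k = i + 1 := by omega
        simp [this]
    · rename_i h
      rcases Nat.lt_or_ge k (i + 1) with h' | h'
      · exact ih k (by omega)
      · have : k = i + 1 := by omega
        subst this; omega

theorem lastArg_last (g : Nat → Int) (i : Nat) :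
    ∀ k, k ≤ i → lastArg g i < k → g k < g (lastArg g i) := by
  induction i with
  | zero => intro k hk h; simp [lastArg] at h ⊢; omega
  | succ i ih =>
    intro k hk h
    simp only [lastArg] at h ⊢; split at h <;> rename_i hcond
    · simp only [if_pos hcond]; omega
    · simp only [if_neg hcond]
      rcases Nat.lt_or_ge k (i + 1) with h' | h'
      · exact ih k (by omega) h
      · have : k = i + 1 := by omega
        subst this; omega

theorem lastArg_unique (g : Nat → Int) (i j : Nat) (hj : j ≤ i)
    (hmax : ∀ k, k ≤ i → g k ≤ g j)
    (hlast : ∀ k, k ≤ i → j < k → g k < g j) : j = lastArg g i := by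
  by_contra hne
  rcases Nat.lt_or_ge j (lastArg g i) with h | h
  · have h1 := hlast (lastArg g i) (lastArg_le g i) h
    have h2 := lastArg_max g i j hj
    omega
  · have hlt : lastArg g i < j := by omega
    have h1 := lastArg_last g i j hj hlt
    have h2 := hmax (lastArg g i) (lastArg_le g i)
    omega

-- the state A's loop carries after having processed indices 1..k
def stA (string : String) (timeline : List Int) (k : Nat) : Option (Char × Int × Int) :=
  if h : lastArg (pvGap timeline) k < string.toList.length then
    some (string.toList[lastArg (pvGap timeline) k], pvGap timeline (lastArg (pvGap timeline) k),
      timeline.getD k 0)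
  else none

theorem str_pyGet?_nat (s : String) (k : Nat) :
    PySem.Str.pyGet? s (k : Int) = s.toList[k]? := by
  simp

theorem str_pyGet?_zero (s : String) : PySem.Str.pyGet? s 0 = s.toList[0]? := by
  have : (0 : Int) = ((0 : Nat) : Int) := by norm_num
  rw [this, str_pyGet?_nat]

theorem list_pyGet?_nat_lt (timeline : List Int) (k : Nat) (h : k < timeline.length) :
    PySem.List.pyGet? timeline (k : Int) = some (timeline.getD k 0) := by
  rw [PySem.List.pyGet?_natCast, List.getElem?_eq_getElem h, List.getD_eq_getElem _ _ h]

theorem pvGap_pos (timeline : List Int) (i : Nat) (h : 1 ≤ i) :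
    pvGap timeline i = timeline.getD i 0 - timeline.getD (i - 1) 0 := by
  unfold pvGap; rw [if_neg (by omega)]

theorem stepA_stA (string : String) (timeline : List Int) (i : Nat)
    (h1 : 1 ≤ i) (h2 : i < timeline.length) :
    pvStepA string timeline (stA string timeline (i - 1)) (i : Int) = stA string timeline i := by
  have hti : PySem.List.pyGet? timeline (i : Int) = some (timeline.getD i 0) :=
    list_pyGet?_nat_lt timeline i h2
  have hble : lastArg (pvGap timeline) (i - 1) ≤ i - 1 := lastArg_le _ _
  by_cases hb : lastArg (pvGap timeline) (i - 1) < string.toList.length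
  · rw [stA, dif_pos hb]
    simp only [pvStepA, Option.bind_some, hti]
    rw [show timeline.getD i 0 - timeline.getD (i - 1) 0 = pvGap timeline i from
      (pvGap_pos timeline i h1).symm]
    by_cases hc : pvGap timeline (lastArg (pvGap timeline) (i - 1)) ≤ pvGap timeline i
    · rw [if_pos hc, str_pyGet?_nat]
      by_cases hl : i < string.toList.length
      · rw [List.getElem?_eq_getElem hl]
        rw [stA, lastArg_succ _ _ h1, if_pos hc, dif_pos hl]
        rfl
      · rw [List.getElem?_eq_none (by omega), stA, lastArg_succ _ _ h1, if_pos hc,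
          dif_neg hl]
        rfl
    · rw [if_neg hc, stA, lastArg_succ _ _ h1, if_neg hc, dif_pos hb]
  · rw [stA, dif_neg hb]
    simp only [pvStepA, Option.bind_none]
    rw [stA, lastArg_succ _ _ h1]
    split
    · rw [dif_neg (by omega)]
    · rfl

theorem A_fold (string : String) (timeline : List Int) (i : Nat)
    (h1 : 1 ≤ i) (h2 : i ≤ timeline.length) :
    (PySem.List.pyRange 1 (i : Int) 1).foldl (pvStepA string timeline)
      ((PySem.Str.pyGet? string 0).bind fun c =>
        (PySem.List.pyGet? timeline 0).map fun t0 => (c, t0, t0))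
      = stA string timeline (i - 1) := by
  induction i with
  | zero => omega
  | succ i ih =>
    rcases Nat.eq_or_lt_of_le h1 with h | h
    · have hi : i = 0 := by omega
      subst hi
      rw [PySem.List.pyRange_one_eq_nil (by norm_num)]
      have ht0 : PySem.List.pyGet? timeline 0 = some (timeline.getD 0 0) := by
        have h0 : (0 : Int) = ((0 : Nat) : Int) := by norm_num
        rw [h0]; exact list_pyGet?_nat_lt timeline 0 (by omega)
      rw [List.foldl_nil, str_pyGet?_zero, ht0]
      simp only [Nat.add_sub_cancel, stA, lastArg]
      by_cases hl : 0 < string.toList.length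
      · rw [List.getElem?_eq_getElem hl, dif_pos hl]
        simp [pvGap]
      · rw [List.getElem?_eq_none (by omega), dif_neg hl]
        rfl
    · have h1' : 1 ≤ i := by omega
      have hcast : ((i + 1 : Nat) : Int) = (i : Int) + 1 := by push_cast; ring
      rw [hcast, PySem.List.pyRange_one_succ_right (by exact_mod_cast h1'),
        List.foldl_append, ih h1' (by omega), List.foldl_cons, List.foldl_nil,
        Nat.add_sub_cancel]
      exact stepA_stA string timeline i h1' (by omega)

-- B's tuple-key reverse sort is the reverse sort by the lexicographic key
theorem sorted2_rev_eq_sorted_lex {α : Type} (xs : List α) (k1 k2 : α → Int) :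
    PySem.List.sorted2 xs k1 k2 true
      = PySem.List.sorted xs (fun x => toLex (k1 x, k2 x)) true := by
  have hfun : (fun (a b : α) => decide (k1 b < k1 a) || !decide (k1 a < k1 b) && decide (k2 b < k2 a))
      = (fun (a b : α) => decide (toLex (k1 b, k2 b) < toLex (k1 a, k2 a))) := by
    funext a b
    have hiff : (toLex (k1 b, k2 b) < toLex (k1 a, k2 a)) ↔
        (k1 b < k1 a ∨ (¬ (k1 a < k1 b) ∧ k2 b < k2 a)) := by
      rw [Prod.Lex.lt_iff]
      simp only [ofLex_toLex]
      constructor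
      · rintro (h | ⟨h1, h2⟩)
        · exact Or.inl h
        · exact Or.inr ⟨by omega, h2⟩
      · rintro (h | ⟨h1, h2⟩)
        · exact Or.inl h
        · rcases lt_trichotomy (k1 b) (k1 a) with h' | h' | h'
          · exact Or.inl h'
          · exact Or.inr ⟨h', h2⟩
          · exact absurd h' h1
    rw [show decide (toLex (k1 b, k2 b) < toLex (k1 a, k2 a))
        = decide (k1 b < k1 a ∨ (¬ (k1 a < k1 b) ∧ k2 b < k2 a)) from decide_eq_decide.mpr hiff]
    by_cases h1 : k1 b < k1 a <;> by_cases h2 : k1 a < k1 b <;> by_cases h3 : k2 b < k2 a <;>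
      simp [h1, h2, h3]
  show List.foldl (fun acc x => PySem.List.insertBy
      (fun a b => decide (k1 b < k1 a) || !decide (k1 a < k1 b) && decide (k2 b < k2 a)) x acc) [] xs
    = List.foldl (fun acc x => PySem.List.insertBy
      (fun a b => decide (toLex (k1 b, k2 b) < toLex (k1 a, k2 a))) x acc) [] xs
  rw [hfun]

-- the gaps table of B agrees with pvGap on indices below n (when n ≤ len(timeline))
theorem gapsB_agree (timeline : List Int) (n : Int) (m : Nat) (hm : n = (m : Int))
    (hlen : m ≤ timeline.length) (k : Nat) (hk : k < m) :
    PySem.List.pyGetD (pvGapsB n timeline) (k : Int) 0 = pvGap timeline k := by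
  unfold pvGapsB
  rw [PySem.List.pyGetD_natCast]
  cases k with
  | zero =>
    simp [pvGap, PySem.List.pyGetD_zero]
  | succ k =>
    simp only [List.getD_cons_succ]
    have hslice : PySem.List.slice timeline (some 1) (some n)
        = (timeline.drop 1).take (m - 1) := by
      rw [hm, show (1 : Int) = ((1 : Nat) : Int) by norm_num,
        PySem.List.slice_natCast]
    rw [hslice]
    have hlz : (timeline.zip ((timeline.drop 1).take (m - 1))).length = m - 1 := by
      rw [List.length_zip, List.length_take, List.length_drop]
      omega
    have hk' : k < (timeline.zip ((timeline.drop 1).take (m - 1))).length := by omega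
    have hkm : k < ((timeline.zip ((timeline.drop 1).take (m - 1))).map
        (fun p => p.2 - p.1)).length := by rw [List.length_map]; omega
    rw [List.getD_eq_getElem _ _ hkm, List.getElem_map, List.getElem_zip]
    have h1 : (((timeline.drop 1).take (m - 1)))[k]'(by
        rw [List.length_take, List.length_drop]; omega) = timeline[k + 1]'(by omega) := by
      rw [List.getElem_take, List.getElem_drop]
      congr 1
      omega
    have h2 : timeline[k]'(by omega) = timeline.getD k 0 :=
      (List.getD_eq_getElem _ _ (by omega)).symm
    have h3 : timeline[k + 1]'(by omega) = timeline.getD (k + 1) 0 :=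
      (List.getD_eq_getElem _ _ (by omega)).symm
    simp only [h1, h2, h3]
    rw [pvGap_pos timeline (k + 1) (by omega), Nat.add_sub_cancel]

-- ===== VERDICT (by name: the statement is the Claim_ definition above) =====
theorem get_hardest_letter_spec : Claim_equal_get_hardest_letter := by
  intro n string timeline _hdom hpre
  unfold Spec_get_hardest_letter
  obtain ⟨hn0, hpre⟩ := hpre
  by_cases hguard : n = 0 ∨ timeline = []
  · unfold get_hardest_letter get_hardest_letter_alt
    rw [if_pos hguard, if_pos hguard]
  · rw [not_or] at hguard
    rcases hpre with h | h | h
    · exact absurd h hguard.1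
    · exact absurd h hguard.2
    obtain ⟨hlen, j, hj, hmax, hlast, hjs⟩ := h
    obtain ⟨m, hnm⟩ : ∃ m : Nat, n = (m : Int) := ⟨n.toNat, by omega⟩
    subst hnm
    rw [Int.toNat_natCast] at hj hmax hlast
    have hm1 : 1 ≤ m := by
      rcases Nat.eq_zero_or_pos m with h0 | h0
      · exact absurd (by exact_mod_cast h0 : ((m : Nat) : Int) = 0) hguard.1
      · exact h0
    have hmlen : m ≤ timeline.length := by exact_mod_cast hlen
    have hg : ¬(((m : Nat) : Int) = 0 ∨ timeline = []) := by
      rw [not_or]; exact hguard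
    have hj' : j = lastArg (pvGap timeline) (m - 1) :=
      lastArg_unique _ _ _ (by omega) (fun k hk => hmax k (by omega))
        (fun k hk hk' => hlast k (by omega) hk')
    have hbs : lastArg (pvGap timeline) (m - 1) < string.toList.length := hj' ▸ hjs
    -- A's side
    unfold get_hardest_letter
    rw [if_neg hg, A_fold string timeline m hm1 hmlen]
    rw [stA, dif_pos hbs]
    -- B's side
    unfold get_hardest_letter_alt
    rw [if_neg hg]
    simp only
    rw [sorted2_rev_eq_sorted_lex]
    set key : Int → Int ×ₗ Int :=
      fun i => toLex (PySem.List.pyGetD (pvGapsB ((m : Nat) : Int) timeline) i 0, i) with hkey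
    have hrange : PySem.List.pyRange 0 ((m : Nat) : Int) 1
        = 0 :: PySem.List.pyRange 1 ((m : Nat) : Int) 1 := by
      have h0 : (0 : Int) < ((m : Nat) : Int) := by exact_mod_cast hm1
      have := PySem.List.pyRange_one_cons (a := 0) (b := ((m : Nat) : Int)) h0
      simpa using this
    have hne : PySem.List.sorted (PySem.List.pyRange 0 ((m : Nat) : Int) 1) key true ≠ [] := by
      rw [Ne, PySem.List.sorted_eq_nil_iff, hrange]
      exact List.cons_ne_nil _ _
    obtain ⟨b, t, hsort⟩ := List.exists_cons_of_ne_nil hne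
    rw [hsort, PySem.List.pyGet?_zero_cons]
    have hmemb : b ∈ PySem.List.pyRange 0 ((m : Nat) : Int) 1 := by
      have : b ∈ PySem.List.sorted (PySem.List.pyRange 0 ((m : Nat) : Int) 1) key true := by
        rw [hsort]; exact List.mem_cons_self
      exact (PySem.List.mem_sorted _ _ _ _).mp this
    have hbrange : 0 ≤ b ∧ b < ((m : Nat) : Int) := by
      have := (PySem.List.mem_pyRange_one).mp hmemb
      omega
    have hge := PySem.List.key_head_sorted_rev_ge _ _ hsort
    have hjm : ((j : Nat) : Int) ∈ PySem.List.pyRange 0 ((m : Nat) : Int) 1 := by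
      rw [PySem.List.mem_pyRange_one]
      constructor
      · positivity
      · exact_mod_cast hj
    have hkj := hge _ hjm
    set bk := b.toNat with hbk
    have hbeq : b = ((bk : Nat) : Int) := by omega
    have hbkm : bk < m := by omega
    have hgb : PySem.List.pyGetD (pvGapsB ((m : Nat) : Int) timeline) b 0 = pvGap timeline bk := by
      rw [hbeq]; exact gapsB_agree timeline _ m rfl hmlen bk hbkm
    have hgj : PySem.List.pyGetD (pvGapsB ((m : Nat) : Int) timeline) ((j : Nat) : Int) 0
        = pvGap timeline j :=
      gapsB_agree timeline _ m rfl hmlen j hj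
    rw [hkey] at hkj
    simp only [hgb, hgj] at hkj
    rw [Prod.Lex.le_iff] at hkj
    simp only [ofLex_toLex] at hkj
    have hbj : bk = j := by
      rcases hkj with h' | ⟨h1, h2⟩
      · have := hmax bk hbkm
        omega
      · by_contra hne'
        have hjb : j < bk := by omega
        have := hlast bk hbkm hjb
        omega
    have hbj' : b = ((j : Nat) : Int) := by omega
    rw [hbj']
    simp only [str_pyGet?_nat string j, List.getElem?_eq_getElem hjs, ← hj']
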